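-- pv_equiv track=rewrite | github.com/atulvinod/leetcoding | python-dsa/modifyTheMatrix.py | modifiedMatrix
-- ===== SOURCE A (Python) =====
-- from typing import List
--
-- def modifiedMatrix(matrix: List[List[int]]) -> List[List[int]]:
--     colMax = -float('inf')
--     result = [row[:] for row in matrix]
--     for col in range(len(matrix[0])):
--         negativeNumberIndexes = []
--         for row in range(len(matrix)):
--             colMax = max(colMax, matrix[row][col])
--             if result[row][col] == -1:
--                 negativeNumberIndexes.append(row)
--
--         for i in negativeNumberIndexes:
--             result[i][col] = colMax
--         colMax = -float('inf')
--
--     return result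
-- ===== SOURCE B (Python) =====
-- from typing import List
--
-- def modifiedMatrix(matrix: List[List[int]]) -> List[List[int]]:
--     # One row-major pass: fold the rows together with elementwise max to get
--     # the column maxima, then patch each row's -1 entries.
--     colMax = list(matrix[0])
--     for row in matrix[1:]:
--         colMax = [max(a, b) for a, b in zip(colMax, row)]
--     result = []
--     for row in matrix:
--         new = list(row)
--         for j, m in enumerate(colMax):
--             if new[j] == -1:
--                 new[j] = m
--         result.append(new)
--     return result
-- ===== Notes on version B (the rewrite author's own statement) =====
-- stated objective: alternative
-- what changed: Instead of A's column-by-column passes that each find one column maximum and collect the row indexes of -1 entries before writing them back, B makes one row-major pass folding the rows together with elementwise max to obtain the whole column-maxima vector at once, then patches each row directly; Pre_ excludes the inputs where A raises IndexError (empty matrix, rows shorter than the first row).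
import Mathlib
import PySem

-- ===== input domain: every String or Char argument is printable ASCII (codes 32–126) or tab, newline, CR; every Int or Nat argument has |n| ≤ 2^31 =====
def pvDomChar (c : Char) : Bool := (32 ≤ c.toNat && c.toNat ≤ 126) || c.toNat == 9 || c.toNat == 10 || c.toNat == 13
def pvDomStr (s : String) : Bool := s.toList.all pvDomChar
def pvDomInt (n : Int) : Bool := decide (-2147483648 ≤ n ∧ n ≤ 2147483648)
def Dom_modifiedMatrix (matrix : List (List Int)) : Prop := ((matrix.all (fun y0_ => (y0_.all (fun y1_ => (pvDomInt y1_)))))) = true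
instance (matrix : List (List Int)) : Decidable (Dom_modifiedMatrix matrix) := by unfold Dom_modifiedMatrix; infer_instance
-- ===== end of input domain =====

-- B replaces A's column-by-column passes (per-column max + collected -1 indexes + write-back)
-- by one row-major elementwise-max fold producing all column maxima at once, then a direct patch pass.


-- ===== PORT A =====
-- the inner row loop: colMax (None models the initial -float('inf'), exact because the
-- loop body always replaces it by an int) and the list of -1 row indexes, built together
def pvAScan (matrix result : List (List Int)) (col : Nat) : Option Int × List Nat :=
  (List.range matrix.length).foldl
    (fun st row =>
      (some (match st.1 with
             | none => (matrix.getD row []).getD col 0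
             | some c => max c ((matrix.getD row []).getD col 0)),
       if (result.getD row []).getD col 0 = -1 then st.2 ++ [row] else st.2))
    (none, [])

def modifiedMatrix (matrix : List (List Int)) : List (List Int) :=
  -- result = [row[:] for row in matrix]  (row[:] copies; value-identical)
  let result := matrix.map (fun row => row)
  -- len(matrix[0]): Pre_ excludes matrix = [], where Python raises IndexError
  (List.range (matrix.headD []).length).foldl
    (fun result col =>
      let scan := pvAScan matrix result col
      scan.2.foldl
        (fun res i => res.set i ((res.getD i []).set col (scan.1.getD 0)))
        result)
    result

-- ===== PORT B =====
def modifiedMatrix_alt (matrix : List (List Int)) : List (List Int) :=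
  -- colMax = list(matrix[0]); for row in matrix[1:]: colMax = [max(a,b) for a,b in zip(colMax,row)]
  -- (matrix[0] on the empty matrix raises in Python; Pre_ excludes it)
  let colMax := matrix.tail.foldl
    (fun acc row => (acc.zip row).map (fun p => max p.1 p.2)) (matrix.headD [])
  -- for each row: new = list(row); for j, m in enumerate(colMax): if new[j] == -1: new[j] = m
  matrix.map (fun row =>
    colMax.zipIdx.foldl
      (fun new p => if new.getD p.2 0 = -1 then new.set p.2 p.1 else new) row)

-- ===== PRECONDITION & SPEC =====
-- Pre_ excludes exactly the inputs where A raises IndexError: the empty matrix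
-- (len(matrix[0])) and matrices with a row shorter than the first row (matrix[row][col]).
def Pre_modifiedMatrix (matrix : List (List Int)) : Prop :=
  matrix ≠ [] ∧ ∀ row ∈ matrix, (matrix.headD []).length ≤ row.length
instance (matrix : List (List Int)) : Decidable (Pre_modifiedMatrix matrix) := by
  unfold Pre_modifiedMatrix; infer_instance

def pvWitness_modifiedMatrix : List (List Int) := [[1, -1], [-1, 3]]

def Spec_modifiedMatrix (matrix : List (List Int)) (out : List (List Int)) : Prop := out = modifiedMatrix_alt matrix
instance (matrix : List (List Int)) (out : List (List Int)) : Decidable (Spec_modifiedMatrix matrix out) := by unfold Spec_modifiedMatrix; infer_instance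

-- ===== CLAIM (what is proved, stated in full; the proofs are below) =====
def Claim_equal_modifiedMatrix : Prop := ∀ (matrix : List (List Int)), Dom_modifiedMatrix matrix → Pre_modifiedMatrix matrix → Spec_modifiedMatrix matrix (modifiedMatrix matrix)

-- ===== LEMMAS AND PROOFS =====

-- the maximum of column j (0 default never used on admitted inputs)
def pvCV (matrix : List (List Int)) (j : Nat) : Int :=
  ((matrix.map (fun r => r.getD j 0)).max?).getD 0

-- one row after the first k columns have been processed
def pvG (matrix : List (List Int)) (k : Nat) (row : List Int) : List Int :=
  row.zipIdx.map (fun p => if p.2 < k ∧ p.1 = -1 then pvCV matrix p.2 else p.1)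

-- the whole table after the first k columns have been processed
def pvF (matrix : List (List Int)) (k : Nat) : List (List Int) :=
  matrix.map (pvG matrix k)

-- step of A's outer loop (definitionally the fold body of the port)
def pvStep (matrix : List (List Int)) (result : List (List Int)) (col : Nat) : List (List Int) :=
  (pvAScan matrix result col).2.foldl
    (fun res i => res.set i ((res.getD i []).set col ((pvAScan matrix result col).1.getD 0)))
    result

lemma pvModA (matrix : List (List Int)) :
    modifiedMatrix matrix
      = (List.range (matrix.headD []).length).foldl (pvStep matrix) (matrix.map (fun r => r)) := rfl

lemma pvG_length (matrix : List (List Int)) (k : Nat) (row : List Int) :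
    (pvG matrix k row).length = row.length := by simp [pvG]

lemma pvG_zero (matrix : List (List Int)) (row : List Int) : pvG matrix 0 row = row := by
  simp [pvG]

lemma pvG_getElem? (matrix : List (List Int)) (k : Nat) (row : List Int) (j : Nat)
    (hj : j < row.length) :
    (pvG matrix k row)[j]? = some (if j < k ∧ row.getD j 0 = -1 then pvCV matrix j else row.getD j 0) := by
  simp [pvG, hj]

lemma pvG_getD (matrix : List (List Int)) (k : Nat) (row : List Int) (j : Nat)
    (hj : j < row.length) :
    (pvG matrix k row).getD j 0
      = if j < k ∧ row.getD j 0 = -1 then pvCV matrix j else row.getD j 0 := by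
  rw [List.getD_eq_getElem?_getD, pvG_getElem? _ _ _ _ hj]; rfl

lemma pvMaxFold_some {β : Type} (l : List β) (val : β → Int) (c : Int) :
    l.foldl (fun o r => some (match o with | none => val r | some c => max c (val r))) (some c)
      = some (l.foldl (fun c r => max c (val r)) c) := by
  induction l generalizing c with
  | nil => rfl
  | cons x xs ih => simp [ih]

lemma pvMaxFold_none {β : Type} (l : List β) (val : β → Int) :
    l.foldl (fun o r => some (match o with | none => val r | some c => max c (val r))) none
      = (l.map val).max? := by
  cases l with
  | nil => rfl
  | cons x xs =>
    simp only [List.foldl_cons, List.map_cons, List.max?_cons']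
    rw [pvMaxFold_some]
    simp [List.foldl_map]

lemma pvRangeMapGetD {α β : Type} [Inhabited α] (l : List α) (g : α → β) (d : α) :
    (List.range l.length).map (fun i => g (l.getD i d)) = l.map g := by
  apply List.ext_getElem (by simp)
  intro i h1 h2
  have hi : i < l.length := by simpa using h1
  simp [List.getD_eq_getElem?_getD, List.getElem?_eq_getElem hi]

lemma pvScanFst (matrix result : List (List Int)) (col : Nat) (hne : matrix ≠ []) :
    (pvAScan matrix result col).1 = some (pvCV matrix col) := by
  unfold pvAScan
  rw [PySem.List.foldl_prod_mk
    (f := fun (o : Option Int) (row : Nat) => some (match o with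
            | none => (matrix.getD row []).getD col 0
            | some c => max c ((matrix.getD row []).getD col 0)))
    (g := fun (acc : List Nat) (row : Nat) =>
            if (result.getD row []).getD col 0 = -1 then acc ++ [row] else acc)]
  simp only
  rw [pvMaxFold_none, pvRangeMapGetD matrix (fun r => r.getD col 0) []]
  cases matrix with
  | nil => exact absurd rfl hne
  | cons h t => simp [pvCV]

lemma pvScanSnd (matrix result : List (List Int)) (col : Nat) :
    (pvAScan matrix result col).2
      = (List.range matrix.length).filter (fun r => decide ((result.getD r []).getD col 0 = -1)) := by
  unfold pvAScan
  rw [PySem.List.foldl_prod_mk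
    (f := fun (o : Option Int) (row : Nat) => some (match o with
            | none => (matrix.getD row []).getD col 0
            | some c => max c ((matrix.getD row []).getD col 0)))
    (g := fun (acc : List Nat) (row : Nat) =>
            if (result.getD row []).getD col 0 = -1 then acc ++ [row] else acc)]
  simpa using PySem.List.foldl_append_if
    (fun r => decide ((result.getD r []).getD col 0 = -1))
    (fun r => r) (List.range matrix.length) []

lemma pvUpdGet (idxs : List Nat) (R : List (List Int)) (cm : Int) (k : Nat)
    (hn : idxs.Nodup) (hb : ∀ i ∈ idxs, i < R.length) (i : Nat) :
    (idxs.foldl (fun res r => res.set r ((res.getD r []).set k cm)) R)[i]?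
      = if i ∈ idxs then some ((R.getD i []).set k cm) else R[i]? := by
  induction idxs generalizing R with
  | nil => simp
  | cons r rest ih =>
    have hr : r < R.length := hb r (by simp)
    have hnr : r ∉ rest := (List.nodup_cons.mp hn).1
    have hrest : rest.Nodup := (List.nodup_cons.mp hn).2
    simp only [List.foldl_cons]
    rw [ih _ hrest (fun j hj => by simpa using hb j (List.mem_cons_of_mem _ hj))]
    by_cases hir : i = r
    · subst hir
      rw [if_neg hnr, if_pos (List.mem_cons_self), List.getElem?_set_self (by simpa using hr)]
    · have h1 : (R.set r ((R.getD r []).set k cm)).getD i [] = R.getD i [] := by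
        simp [List.getD_eq_getElem?_getD, List.getElem?_set_ne (show r ≠ i by omega)]
      rw [h1, List.getElem?_set_ne (by omega : r ≠ i)]
      simp [List.mem_cons, hir]

lemma pvRowStep (matrix : List (List Int)) (k : Nat) (row : List Int) (hk : k < row.length) :
    (if row.getD k 0 = -1 then (pvG matrix k row).set k (pvCV matrix k) else pvG matrix k row)
      = pvG matrix (k + 1) row := by
  by_cases hneg : row.getD k 0 = -1
  · rw [if_pos hneg]
    apply List.ext_getElem?
    intro j
    by_cases hj : j < row.length
    · by_cases hjk : j = k
      · subst hjk
        rw [List.getElem?_set_self (by rw [pvG_length]; exact hk), pvG_getElem? _ _ _ _ hj]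
        have hneg' : row[j]?.getD 0 = -1 := by rw [← List.getD_eq_getElem?_getD]; exact hneg
        simp [hneg']
      · rw [List.getElem?_set_ne (fun h => hjk h.symm), pvG_getElem? _ _ _ _ hj,
          pvG_getElem? _ _ _ _ hj]
        have hiff : (j < k) ↔ (j < k + 1) := by omega
        simp [hiff]
    · rw [List.getElem?_eq_none (by simp [pvG_length]; omega),
        List.getElem?_eq_none (by rw [pvG_length]; omega)]
  · rw [if_neg hneg]
    apply List.ext_getElem?
    intro j
    by_cases hj : j < row.length
    · rw [pvG_getElem? _ _ _ _ hj, pvG_getElem? _ _ _ _ hj]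
      by_cases hjk : j = k
      · subst hjk
        have hneg' : ¬ row[j]?.getD 0 = -1 := by rw [← List.getD_eq_getElem?_getD]; exact hneg
        simp [hneg']
      · have hiff : (j < k) ↔ (j < k + 1) := by omega
        simp [hiff]
    · rw [List.getElem?_eq_none (by rw [pvG_length]; omega),
        List.getElem?_eq_none (by rw [pvG_length]; omega)]

lemma pvFget? (matrix : List (List Int)) (k : Nat) (i : Nat) (him : i < matrix.length) :
    (pvF matrix k)[i]? = some (pvG matrix k (matrix.getD i [])) := by
  simp [pvF, List.getElem?_eq_getElem him]

lemma pvFgetD (matrix : List (List Int)) (k : Nat) (i : Nat) (him : i < matrix.length) :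
    (pvF matrix k).getD i [] = pvG matrix k (matrix.getD i []) := by
  rw [List.getD_eq_getElem?_getD, pvFget? _ _ _ him]; rfl

lemma pvStepF (matrix : List (List Int)) (k : Nat)
    (hne : matrix ≠ []) (hlen : ∀ row ∈ matrix, (matrix.headD []).length ≤ row.length)
    (hk : k < (matrix.headD []).length) :
    pvStep matrix (pvF matrix k) k = pvF matrix (k + 1) := by
  have hFlen : (pvF matrix k).length = matrix.length := by simp [pvF]
  have hrowlen : ∀ i, i < matrix.length → k < (matrix.getD i []).length := by
    intro i hi
    rw [List.getD_eq_getElem _ _ hi]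
    exact lt_of_lt_of_le hk (hlen _ (List.getElem_mem hi))
  have hpred : ∀ r ∈ List.range matrix.length,
      (decide (((pvF matrix k).getD r []).getD k 0 = -1))
        = (decide ((matrix.getD r []).getD k 0 = -1)) := by
    intro r hr
    have hrm : r < matrix.length := List.mem_range.mp hr
    rw [pvFgetD _ _ _ hrm, pvG_getD _ _ _ _ (hrowlen r hrm)]
    simp
  unfold pvStep
  rw [pvScanFst _ _ _ hne, pvScanSnd, List.filter_congr hpred]
  simp only [Option.getD_some]
  set idxs := (List.range matrix.length).filter (fun r => decide ((matrix.getD r []).getD k 0 = -1))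
    with hidxs
  have hnodup : idxs.Nodup := List.Nodup.filter _ (List.nodup_range)
  have hbound : ∀ i ∈ idxs, i < (pvF matrix k).length := by
    intro i hi
    rw [hFlen]
    exact List.mem_range.mp (List.mem_of_mem_filter hi)
  have hmem : ∀ i, (i ∈ idxs ↔ (i < matrix.length ∧ (matrix.getD i []).getD k 0 = -1)) := by
    intro i
    simp [hidxs, List.mem_filter, List.mem_range]
  apply List.ext_getElem?
  intro i
  rw [pvUpdGet _ _ _ _ hnodup hbound]
  by_cases him : i < matrix.length
  · rw [pvFget? _ (k+1) _ him, ← pvRowStep matrix k _ (hrowlen i him)]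
    by_cases hneg : (matrix.getD i []).getD k 0 = -1
    · rw [if_pos ((hmem i).mpr ⟨him, hneg⟩), if_pos hneg, pvFgetD _ _ _ him]
    · rw [if_neg (fun h => hneg ((hmem i).mp h).2), if_neg hneg, pvFget? _ _ _ him]
  · rw [if_neg (fun h => him ((hmem i).mp h).1),
      List.getElem?_eq_none (by rw [hFlen]; omega),
      List.getElem?_eq_none (by simp [pvF]; omega)]

lemma pvAloop (matrix : List (List Int)) (k : Nat)
    (hne : matrix ≠ []) (hlen : ∀ row ∈ matrix, (matrix.headD []).length ≤ row.length)
    (hk : k ≤ (matrix.headD []).length) :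
    (List.range k).foldl (pvStep matrix) (matrix.map (fun r => r)) = pvF matrix k := by
  induction k with
  | zero =>
    simp only [List.range_zero, List.foldl_nil, pvF]
    exact List.map_congr_left (fun row _ => (pvG_zero matrix row).symm)
  | succ k ih =>
    rw [List.range_succ, List.foldl_append, ih (by omega)]
    simp only [List.foldl_cons, List.foldl_nil]
    exact pvStepF matrix k hne hlen (by omega)

-- ===== B-side lemmas =====

-- B's elementwise-max combine
def pvCombine (acc row : List Int) : List Int := (acc.zip row).map (fun p => max p.1 p.2)

lemma pvCombine_length (acc row : List Int) (h : acc.length ≤ row.length) :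
    (pvCombine acc row).length = acc.length := by
  simp [pvCombine]; omega

lemma pvCombine_getD (acc row : List Int) (j : Nat) (hj : j < acc.length)
    (h : acc.length ≤ row.length) :
    (pvCombine acc row).getD j 0 = max (acc.getD j 0) (row.getD j 0) := by
  have hjr : j < row.length := by omega
  have hjc : j < (pvCombine acc row).length := by rw [pvCombine_length _ _ h]; exact hj
  rw [List.getD_eq_getElem _ _ hjc, List.getD_eq_getElem _ _ hj, List.getD_eq_getElem _ _ hjr]
  simp [pvCombine]

lemma pvFoldMax_length (l : List (List Int)) (acc : List Int)
    (h : ∀ r ∈ l, acc.length ≤ r.length) :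
    (l.foldl pvCombine acc).length = acc.length := by
  induction l generalizing acc with
  | nil => rfl
  | cons x xs ih =>
    have hx : acc.length ≤ x.length := h x (by simp)
    rw [List.foldl_cons, ih (pvCombine acc x)
      (fun r hr => by rw [pvCombine_length _ _ hx]; exact h r (List.mem_cons_of_mem _ hr)),
      pvCombine_length _ _ hx]

lemma pvFoldMax_getD (l : List (List Int)) (acc : List Int)
    (h : ∀ r ∈ l, acc.length ≤ r.length) (j : Nat) (hj : j < acc.length) :
    (l.foldl pvCombine acc).getD j 0
      = (l.map (fun r => r.getD j 0)).foldl max (acc.getD j 0) := by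
  induction l generalizing acc with
  | nil => rfl
  | cons x xs ih =>
    have hx : acc.length ≤ x.length := h x (by simp)
    rw [List.foldl_cons, ih (pvCombine acc x)
      (fun r hr => by rw [pvCombine_length _ _ hx]; exact h r (List.mem_cons_of_mem _ hr))
      (by rw [pvCombine_length _ _ hx]; exact hj),
      pvCombine_getD _ _ _ hj hx]
    rfl

lemma pvFoldlMaxComm (xs : List Int) : ∀ (a x : Int), xs.foldl max (max a x) = max a (xs.foldl max x) := by
  induction xs with
  | nil => intro a x; rfl
  | cons y ys ih =>
    intro a x
    simp only [List.foldl_cons]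
    rw [max_assoc, ih]

lemma pvFoldlMaxElim (l : List Int) (a : Int) :
    l.foldl max a = (l.max?).elim a (max a) := by
  cases l with
  | nil => rfl
  | cons x xs =>
    simp only [List.foldl_cons, List.max?_cons', Option.elim_some]
    exact pvFoldlMaxComm xs a x

-- B's colMax equals the column-maxima table
lemma pvColMax (matrix : List (List Int))
    (hne : matrix ≠ []) (hlen : ∀ row ∈ matrix, (matrix.headD []).length ≤ row.length) :
    matrix.tail.foldl pvCombine (matrix.headD [])
      = (List.range (matrix.headD []).length).map (pvCV matrix) := by
  cases matrix with
  | nil => exact absurd rfl hne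
  | cons h t =>
    simp only [List.headD_cons, List.tail_cons] at hlen ⊢
    have hlt : ∀ r ∈ t, h.length ≤ r.length := fun r hr => hlen r (List.mem_cons_of_mem _ hr)
    apply List.ext_getElem (by rw [pvFoldMax_length t h hlt]; simp)
    intro j h1 h2
    have hj : j < h.length := by rwa [pvFoldMax_length t h hlt] at h1
    rw [← List.getD_eq_getElem _ 0 h1, pvFoldMax_getD t h hlt j hj]
    simp only [List.getElem_map, List.getElem_range]
    simp [pvCV]
    exact pvFoldlMaxElim _ _

-- B's patch fold over columns k, k+1, …, K-1 finishes the row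
lemma pvPatch (matrix : List (List Int)) (row : List Int)
    (hK : (matrix.headD []).length ≤ row.length) :
    ∀ (m k : Nat), k + m = (matrix.headD []).length →
    (((List.range' k m).map (fun j => (pvCV matrix j, j))).foldl
        (fun new p => if new.getD p.2 0 = -1 then new.set p.2 p.1 else new)
        (pvG matrix k row))
      = pvG matrix (matrix.headD []).length row := by
  intro m
  induction m with
  | zero =>
    intro k hk
    have hk' : k = (matrix.headD []).length := by omega
    rw [← hk']
    simp
  | succ m ih =>
    intro k hk
    rw [List.range'_succ, List.map_cons, List.foldl_cons]
    have hkr : k < row.length := by omega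
    have hgd : (pvG matrix k row).getD k 0 = row.getD k 0 := by
      rw [pvG_getD _ _ _ _ hkr]; simp
    rw [hgd]
    rw [pvRowStep matrix k row hkr]
    exact ih (k + 1) (by omega)

-- colMax.zipIdx is the list of (column max, column index) pairs
lemma pvZipIdxMap (matrix : List (List Int)) (K : Nat) :
    ((List.range K).map (pvCV matrix)).zipIdx
      = (List.range' 0 K).map (fun j => (pvCV matrix j, j)) := by
  apply List.ext_getElem (by simp)
  intro i h1 h2
  have hi : i < K := by simpa using h1
  simp [List.getElem_zipIdx, hi]

lemma pvBeqF (matrix : List (List Int))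
    (hne : matrix ≠ []) (hlen : ∀ row ∈ matrix, (matrix.headD []).length ≤ row.length) :
    modifiedMatrix_alt matrix = pvF matrix (matrix.headD []).length := by
  unfold modifiedMatrix_alt pvF
  rw [show (fun acc row => (acc.zip row).map (fun p => max p.1 p.2)) = pvCombine from rfl,
    pvColMax matrix hne hlen]
  show List.map (fun row =>
      ((((List.range (matrix.headD []).length).map (pvCV matrix)).zipIdx).foldl
        (fun new p => if new.getD p.2 0 = -1 then new.set p.2 p.1 else new)) row) matrix
    = List.map (pvG matrix (matrix.headD []).length) matrix
  rw [pvZipIdxMap]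
  apply List.map_congr_left
  intro row hrow
  have := pvPatch matrix row (hlen row hrow) (matrix.headD []).length 0 (by omega)
  rwa [pvG_zero] at this

-- ===== VERDICT (by name: the statement is the Claim_ definition above) =====
theorem modifiedMatrix_spec : Claim_equal_modifiedMatrix := by
  intro matrix _ hpre
  obtain ⟨hne, hlen⟩ := hpre
  unfold Spec_modifiedMatrix
  rw [pvModA, pvAloop matrix _ hne hlen le_rfl, pvBeqF matrix hne hlen]
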